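-- pv_equiv track=rewrite | github.com/evzhu/cs4775proj | FastNJ/FastNJ_experiment.py | get_bipartitions
-- ===== SOURCE A (Python) =====
-- from collections import defaultdict
--
-- def get_bipartitions(parent_map, leaves, root):
--     children_map = defaultdict(list)
--     for c, (p, _) in parent_map.items():
--         children_map[p].append(c)
--
--     all_bip = set()
--
--     def collect_leafset(node):
--         if node in leaves:
--             return {node}
--         s = set()
--         for ch in children_map[node]:
--             s |= collect_leafset(ch)
--         return s
--
--     def traverse(node):
--         for ch in children_map[node]:
--             cset = collect_leafset(ch)
--             if 0 < len(cset) < len(leaves):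
--                 all_bip.add(frozenset(cset))
--             traverse(ch)
--
--     traverse(root)
--     return all_bip
-- ===== SOURCE B (Python) =====
-- def get_bipartitions(parent_map, leaves, root):
--     # Pure staged computation: no children index and no mutable accumulator sets --
--     # children are found by scanning parent_map, one pure recursion returns the
--     # leafsets of all strict descendants at once, and a final comprehension filters them.
--     def kids(p):
--         return [c for c, (q, _) in parent_map.items() if q == p]
--
--     def subtree(node):
--         # (leafset of node, leafsets of all strict descendants of node)
--         pairs = [subtree(ch) for ch in kids(node)]
--         recs = [s for s, _ in pairs] + [r for _, rs in pairs for r in rs]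
--         if node in leaves:
--             own = {node}
--         else:
--             own = set().union(*(s for s, _ in pairs))
--         return own, recs
--
--     n = len(leaves)
--     return {frozenset(s) for s in subtree(root)[1] if 0 < len(s) < n}
-- ===== Notes on version B (the rewrite author's own statement) =====
-- stated objective: alternative
-- what changed: B replaces A's children index plus two entangled accumulator-mutating traversals (which recompute each subtree's leafset at every edge) by a pure staged computation: children are found by scanning parent_map, a single pure recursion returns the leafsets of all strict descendants at once, and one final comprehension filters and collects the bipartitions.
import Mathlib
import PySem

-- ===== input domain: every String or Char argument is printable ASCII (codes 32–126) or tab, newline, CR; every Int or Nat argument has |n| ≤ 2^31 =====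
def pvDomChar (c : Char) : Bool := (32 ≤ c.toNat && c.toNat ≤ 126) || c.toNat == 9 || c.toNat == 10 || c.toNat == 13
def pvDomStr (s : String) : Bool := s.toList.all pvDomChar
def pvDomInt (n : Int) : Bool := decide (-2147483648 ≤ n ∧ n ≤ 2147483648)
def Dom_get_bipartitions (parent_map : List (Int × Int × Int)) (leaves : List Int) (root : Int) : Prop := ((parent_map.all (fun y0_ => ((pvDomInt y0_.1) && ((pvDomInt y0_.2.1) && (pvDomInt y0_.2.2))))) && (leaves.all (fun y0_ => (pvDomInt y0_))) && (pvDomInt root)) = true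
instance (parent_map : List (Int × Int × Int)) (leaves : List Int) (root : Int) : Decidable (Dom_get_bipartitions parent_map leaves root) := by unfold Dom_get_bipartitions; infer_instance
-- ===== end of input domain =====

-- B replaces A's children index and its two entangled accumulator-mutating traversals by a
-- pure staged computation: children are found by scanning parent_map, one pure recursion
-- returns the leafsets of all strict descendants at once, and a final comprehension filters
-- them (objective: alternative). The Python returns a set of frozensets (unordered); both
-- ports represent a frozenset as its sorted element list and serialize the returned set
-- sorted — outputs are compared as finite sets.

-- canonical serialization of the returned set of frozensets (outputs are compared as finite
-- sets; the LinearOrder instance on List Int orders the representative lists)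
def pvCanon (xs : List (List Int)) : List (List Int) :=
  @PySem.List.sorted (List Int) (List Int) List.instLinearOrder.toLT LinearOrder.toDecidableLT xs (fun x => x) false

-- ===== PORT A =====
-- children_map built from the dict parent_map: defaultdict(list) append
def pvChildrenA (parent_map : List (Int × Int × Int)) : PySem.Dict Int (List Int) :=
  ((PySem.Dict.ofList (parent_map.map (fun t => (t.1, t.2)))).items).foldl
    (fun d q => d.modify q.2.1 [] (fun l => l ++ [q.1])) PySem.Dict.empty

-- collect_leafset, fueled (the Python recursion; fuel parent_map.length+1 suffices on Pre_)
def pvCollect (cm : PySem.Dict Int (List Int)) (L : List Int) : Nat → Int → PySem.Set Int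
  | 0, _ => PySem.Set.empty
  | f+1, node =>
    if L.contains node then [node]
    else (cm.getD node []).foldl (fun s ch => PySem.Set.union s (pvCollect cm L f ch)) PySem.Set.empty

-- traverse, fueled; all_bip is threaded as accumulator
def pvTraverse (cm : PySem.Dict Int (List Int)) (L : List Int) :
    Nat → Int → PySem.Set (List Int) → PySem.Set (List Int)
  | 0, _, acc => acc
  | f+1, node, acc =>
    (cm.getD node []).foldl (fun acc ch =>
      let cset := pvCollect cm L f ch
      pvTraverse cm L f ch
        (if 0 < cset.length ∧ cset.length < L.length
         then PySem.Set.add acc (PySem.List.sorted cset (fun x => x))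
         else acc)) acc

def get_bipartitions (parent_map : List (Int × Int × Int)) (leaves : List Int) (root : Int) : List (List Int) :=
  let cm := pvChildrenA parent_map
  pvCanon (pvTraverse cm leaves (parent_map.length + 1) root PySem.Set.empty)

-- ===== PORT B =====
-- kids(p): the children of p found by scanning the dict parent_map (no index is built)
def pvKids (parent_map : List (Int × Int × Int)) (p : Int) : List Int :=
  (((PySem.Dict.ofList (parent_map.map (fun t => (t.1, t.2)))).items).filter
    (fun q => q.2.1 == p)).map (fun q => q.1)

-- subtree: pure fueled recursion returning (leafset of node, leafsets of all strict descendants)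
def pvSubtree (parent_map : List (Int × Int × Int)) (L : List Int) :
    Nat → Int → PySem.Set Int × List (PySem.Set Int)
  | 0, _ => (PySem.Set.empty, [])
  | f+1, node =>
    let pairs := (pvKids parent_map node).map (fun ch => pvSubtree parent_map L f ch)
    let recs := pairs.map (fun pr => pr.1) ++ pairs.flatMap (fun pr => pr.2)
    let own := if L.contains node then ([node] : PySem.Set Int)
               else pairs.foldl (fun s pr => PySem.Set.union s pr.1) PySem.Set.empty
    (own, recs)

def get_bipartitions_alt (parent_map : List (Int × Int × Int)) (leaves : List Int) (root : Int) : List (List Int) :=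
  pvCanon (PySem.Set.ofList
    (((pvSubtree parent_map leaves (parent_map.length + 1) root).2.filter
        (fun s => decide (0 < s.length ∧ s.length < leaves.length))).map
      (fun s => PySem.List.sorted s (fun x => x))))

-- ===== PRECONDITION & SPEC =====
-- k-fold parent lookup in the dict parent_map (none once a node has no recorded parent)
def pvParentIter (pd : PySem.Dict Int (Int × Int)) : Nat → Int → Option Int
  | 0, x => some x
  | k+1, x => match pd.get? x with
    | none => none
    | some pw => pvParentIter pd k pw.1

-- Pre_ excludes exactly the inputs where A raises (RecursionError): those where root lies on a
-- cycle of parent pointers, so the traversal from root revisits root forever.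
def Pre_get_bipartitions (parent_map : List (Int × Int × Int)) (leaves : List Int) (root : Int) : Prop :=
  ((List.range parent_map.length).all (fun k =>
    !(pvParentIter (PySem.Dict.ofList (parent_map.map (fun t => (t.1, t.2)))) (k+1) root == some root))) = true
instance (parent_map : List (Int × Int × Int)) (leaves : List Int) (root : Int) : Decidable (Pre_get_bipartitions parent_map leaves root) := by unfold Pre_get_bipartitions; infer_instance

def pvWitness_get_bipartitions : (List (Int × Int × Int)) × List Int × Int := ([(1, 0, 5), (2, 0, 7)], [1, 2], 0)

def Spec_get_bipartitions (parent_map : List (Int × Int × Int)) (leaves : List Int) (root : Int) (out : List (List Int)) : Prop := out = get_bipartitions_alt parent_map leaves root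
instance (parent_map : List (Int × Int × Int)) (leaves : List Int) (root : Int) (out : List (List Int)) : Decidable (Spec_get_bipartitions parent_map leaves root out) := by unfold Spec_get_bipartitions; infer_instance

-- ===== CLAIM (what is proved, stated in full; the proofs are below) =====
def Claim_equal_get_bipartitions : Prop := ∀ (parent_map : List (Int × Int × Int)) (leaves : List Int) (root : Int), Dom_get_bipartitions parent_map leaves root → Pre_get_bipartitions parent_map leaves root → Spec_get_bipartitions parent_map leaves root (get_bipartitions parent_map leaves root)

-- ===== LEMMAS AND PROOFS =====

-- the children list A's dict delivers equals B's scan of parent_map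
theorem pv_kids_eq (pm : List (Int × Int × Int)) (p : Int) :
    (pvChildrenA pm).getD p [] = pvKids pm p := by
  unfold pvChildrenA pvKids
  set l := (PySem.Dict.ofList (pm.map (fun t => (t.1, t.2)))).items with hl
  have h : l.foldl (fun d q => d.modify q.2.1 [] (fun l => l ++ [q.1])) PySem.Dict.empty
      = (l.map (fun q => (q.2.1, q.1))).foldl (fun d p => d.modify p.1 [] (fun l => l ++ [p.2])) PySem.Dict.empty := by
    rw [List.foldl_map]
  rw [h, PySem.Dict.getD_foldl_modify_append, PySem.Dict.getD_empty]
  simp [List.filter_map, List.map_map, Function.comp_def]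

-- the spec multiset of recorded bipartitions (membership only)
def pvRecs (cm : PySem.Dict Int (List Int)) (L : List Int) (n : Nat) : Nat → Int → List (List Int)
  | 0, _ => []
  | f+1, node => (cm.getD node []).flatMap (fun ch =>
      (if 0 < (pvCollect cm L f ch).length ∧ (pvCollect cm L f ch).length < n
       then [PySem.List.sorted (pvCollect cm L f ch) (fun x => x)] else [])
      ++ pvRecs cm L n f ch)

theorem pv_subtree_fst (pm : List (Int × Int × Int)) (L : List Int) :
    ∀ (f : Nat) (node : Int),
      (pvSubtree pm L f node).1 = pvCollect (pvChildrenA pm) L f node := by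
  intro f
  induction f with
  | zero => intro node; rfl
  | succ f ih =>
    intro node
    simp only [pvSubtree, pvCollect, pv_kids_eq pm node, List.foldl_map, ih]

theorem pv_subtree_mem (pm : List (Int × Int × Int)) (L : List Int) :
    ∀ (f : Nat) (node : Int) (x : List Int),
      x ∈ (((pvSubtree pm L f node).2.filter
              (fun s => decide (0 < s.length ∧ s.length < L.length))).map
            (fun s => PySem.List.sorted s (fun x => x)))
      ↔ x ∈ pvRecs (pvChildrenA pm) L L.length f node := by
  intro f
  induction f with
  | zero => intro node x; simp [pvSubtree, pvRecs]
  | succ f ih =>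
    intro node x
    simp only [pvSubtree, pvRecs, pv_kids_eq pm node]
    simp only [List.filter_append, List.map_append, List.mem_append, List.mem_map,
      List.mem_filter, List.mem_flatMap, List.map_map, List.filter_map, Function.comp_def,
      decide_eq_true_eq, pv_subtree_fst]
    have ih' : ∀ (ch : Int),
        (∃ a, (a ∈ (pvSubtree pm L f ch).2 ∧ 0 < a.length ∧ a.length < L.length) ∧
          (PySem.List.sorted a fun x => x) = x) ↔ x ∈ pvRecs (pvChildrenA pm) L L.length f ch := by
      intro ch
      rw [← ih ch x]
      simp [List.mem_filter]
    constructor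
    · rintro (⟨a, ⟨ha, h1, h2⟩, rfl⟩ | ⟨a, ⟨⟨pr, ⟨ch, hch, rfl⟩, hmem⟩, h1, h2⟩, hx⟩)
      · exact ⟨a, ha, Or.inl (by simp [h1, h2])⟩
      · exact ⟨ch, hch, Or.inr ((ih' ch).mp ⟨a, ⟨hmem, h1, h2⟩, hx⟩)⟩
    · rintro ⟨a, ha, h | h⟩
      · by_cases hc : 0 < (pvCollect (pvChildrenA pm) L f a).length ∧
            (pvCollect (pvChildrenA pm) L f a).length < L.length
        · rw [if_pos hc, List.mem_singleton] at h
          exact Or.inl ⟨a, ⟨ha, hc.1, hc.2⟩, h.symm⟩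
        · rw [if_neg hc] at h
          simp at h
      · rcases (ih' a).mpr h with ⟨r, ⟨hr, h1, h2⟩, hx⟩
        exact Or.inr ⟨r, ⟨⟨pvSubtree pm L f a, ⟨a, ha, rfl⟩, hr⟩, h1, h2⟩, hx⟩

theorem pv_trav_mem (cm : PySem.Dict Int (List Int)) (L : List Int) :
    ∀ (f : Nat) (node : Int) (acc : PySem.Set (List Int)) (x : List Int),
      x ∈ pvTraverse cm L f node acc ↔ x ∈ acc ∨ x ∈ pvRecs cm L L.length f node := by
  intro f
  induction f with
  | zero => intro node acc x; simp [pvTraverse, pvRecs]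
  | succ f ih =>
    intro node acc x
    show x ∈ List.foldl _ acc _ ↔ _
    have key : ∀ (cs : List Int) (acc : PySem.Set (List Int)),
        x ∈ cs.foldl (fun acc ch =>
          let cset := pvCollect cm L f ch
          pvTraverse cm L f ch
            (if 0 < cset.length ∧ cset.length < L.length
             then PySem.Set.add acc (PySem.List.sorted cset (fun x => x))
             else acc)) acc
        ↔ x ∈ acc ∨ x ∈ cs.flatMap (fun ch =>
            (if 0 < (pvCollect cm L f ch).length ∧ (pvCollect cm L f ch).length < L.length
             then [PySem.List.sorted (pvCollect cm L f ch) (fun x => x)] else [])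
            ++ pvRecs cm L L.length f ch) := by
      intro cs
      induction cs with
      | nil => intro acc; simp
      | cons c cs ihc =>
        intro acc
        simp only [List.foldl_cons, List.flatMap_cons, ihc, ih, List.mem_append]
        by_cases h : 0 < (pvCollect cm L f c).length ∧ (pvCollect cm L f c).length < L.length
        · simp [h, PySem.Set.mem_add, or_assoc]
        · simp [h, or_assoc]
    exact key _ _

theorem pv_trav_nodup (cm : PySem.Dict Int (List Int)) (L : List Int) :
    ∀ (f : Nat) (node : Int) (acc : PySem.Set (List Int)),
      acc.Nodup → (pvTraverse cm L f node acc).Nodup := by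
  intro f
  induction f with
  | zero => intro node acc h; exact h
  | succ f ih =>
    intro node acc hacc
    show (List.foldl _ acc _).Nodup
    have key : ∀ (cs : List Int) (acc : PySem.Set (List Int)), acc.Nodup →
        (cs.foldl (fun acc ch =>
          let cset := pvCollect cm L f ch
          pvTraverse cm L f ch
            (if 0 < cset.length ∧ cset.length < L.length
             then PySem.Set.add acc (PySem.List.sorted cset (fun x => x))
             else acc)) acc).Nodup := by
      intro cs
      induction cs with
      | nil => intro acc h; exact h
      | cons c cs ihc =>
        intro acc h
        refine ihc _ (ih _ _ ?_)
        by_cases hc : 0 < (pvCollect cm L f c).length ∧ (pvCollect cm L f c).length < L.length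
        · simpa [hc] using PySem.Set.nodup_add _ _ h
        · simpa [hc] using h
    exact key _ _ hacc

-- ===== VERDICT (by name: the statement is the Claim_ definition above) =====
theorem get_bipartitions_spec : Claim_equal_get_bipartitions := by
  intro pm leaves root _ _
  unfold Spec_get_bipartitions get_bipartitions get_bipartitions_alt
  unfold pvCanon
  refine PySem.List.sorted_eq_sorted_of_perm (α := List Int) (κ := List Int) _ _ (fun x => x) (fun a b h => h) ?_
  have h1 := pv_trav_nodup (pvChildrenA pm) leaves (pm.length + 1) root
    (PySem.Set.empty : PySem.Set (List Int)) List.nodup_nil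
  have h2 : (PySem.Set.ofList
      (((pvSubtree pm leaves (pm.length + 1) root).2.filter
          (fun s => decide (0 < s.length ∧ s.length < leaves.length))).map
        (fun s => PySem.List.sorted s (fun x => x)))).Nodup := PySem.Set.nodup_ofList _
  rw [List.perm_ext_iff_of_nodup h1 h2]
  intro a
  rw [pv_trav_mem, PySem.Set.mem_ofList, pv_subtree_mem]
  simp
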